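-- pv_equiv track=rewrite | github.com/thesteau/Portfolio-Janggi | game_files/board.py | is_within_board
-- ===== SOURCE A (Python) =====
-- def is_within_board(move_from, move_to='a1'):
--     """ Returns a boolean true or false by checking if the movement is within the limitations of the game.
--         Parameters:
--             move_from: The entry origin location assuming the following format "[col][row]"
--             move_to: The entry destination location assuming the following format "[col][row]"
--                 Optional entry is within the board: 'a1'."""
--     rows = [str(num) for num in range(1,11)]  # The move is a string entry - so convert number to string.
--     columns = ['a', 'b', 'c', 'd', 'e', 'f', 'g', 'h', 'i']
--
--     try:  # In the event a non-string was entered; try-except block.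
--         # Check if the entry are within the string element logic: integer range from 2 to 3.
--         if 1 < len(move_from) < 4 and 1 < len(move_to) < 4:
--
--             # Check each individual entry is within the boundary
--             if move_from[0] in columns and move_to[0] in columns and move_from[1:] in rows and move_to[1:] in rows:
--                 return True
--         return False  # Any criteria failures will return false.
--     except:  # All exception errors will return false. No messages necessary.
--         return False
-- ===== SOURCE B (Python) =====
-- import re
--
-- _COORD = re.compile(r'[a-i](?:10|[1-9])')
--
--
-- def is_within_board(move_from, move_to='a1'):
--     """Validate both coordinates with a single regular expression:
--     a column letter a-i followed by a row 1-10 (no leading zeros)."""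
--     try:
--         return bool(_COORD.fullmatch(move_from)) and bool(_COORD.fullmatch(move_to))
--     except Exception:
--         return False
-- ===== Notes on version B (the rewrite author's own statement) =====
-- stated objective: idiomatic
-- what changed: Replaces building row/column candidate lists and doing length + membership checks with a single precompiled regular-expression fullmatch applied to each coordinate.
import Mathlib
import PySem

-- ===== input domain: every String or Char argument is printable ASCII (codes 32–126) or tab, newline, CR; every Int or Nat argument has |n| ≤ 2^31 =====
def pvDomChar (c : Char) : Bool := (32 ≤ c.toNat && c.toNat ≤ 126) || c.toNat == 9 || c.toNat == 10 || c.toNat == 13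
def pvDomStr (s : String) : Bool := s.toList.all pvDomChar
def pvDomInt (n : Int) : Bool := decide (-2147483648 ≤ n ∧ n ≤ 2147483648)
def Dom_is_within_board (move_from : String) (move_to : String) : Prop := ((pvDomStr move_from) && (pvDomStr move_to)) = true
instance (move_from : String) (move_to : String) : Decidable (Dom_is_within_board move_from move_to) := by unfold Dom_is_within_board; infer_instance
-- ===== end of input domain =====

-- B validates each coordinate with a single regular-expression fullmatch instead of A's
-- candidate-list construction plus length and membership checks; same return value.

-- ===== PORT A =====
def is_within_board (move_from : String) (move_to : String) : Bool :=
  let rows : List String := (PySem.List.pyRange 1 11 1).map PySem.Int.toStr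
  let columns : List Char := ['a', 'b', 'c', 'd', 'e', 'f', 'g', 'h', 'i']
  if 1 < PySem.Str.len move_from ∧ PySem.Str.len move_from < 4 ∧
     1 < PySem.Str.len move_to ∧ PySem.Str.len move_to < 4 then
    -- move_from[0] / move_to[0]: the none branch is Python's except arm (never reached here)
    match PySem.Str.pyGet? move_from 0, PySem.Str.pyGet? move_to 0 with
    | some cf, some ct =>
        if cf ∈ columns ∧ ct ∈ columns ∧
           PySem.Str.slice move_from (some 1) none ∈ rows ∧
           PySem.Str.slice move_to (some 1) none ∈ rows then true
        else false
    | _, _ => false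
  else false

-- ===== PORT B =====
-- hand port of re.fullmatch(r'[a-i](?:10|[1-9])', s) ≠ None: exact on every string
-- (a column letter in the range a..i followed by the row "10" or a digit 1..9)
def pvCoordRe (s : String) : Bool :=
  match s.toList with
  | [c, d] => ('a' ≤ c && c ≤ 'i') && ('1' ≤ d && d ≤ '9')
  | [c, d, e] => ('a' ≤ c && c ≤ 'i') && (d == '1' && e == '0')
  | _ => false

def is_within_board_alt (move_from : String) (move_to : String) : Bool :=
  pvCoordRe move_from && pvCoordRe move_to

-- ===== PRECONDITION & SPEC =====
def Spec_is_within_board (move_from : String) (move_to : String) (out : Bool) : Prop := out = is_within_board_alt move_from move_to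
instance (move_from : String) (move_to : String) (out : Bool) : Decidable (Spec_is_within_board move_from move_to out) := by unfold Spec_is_within_board; infer_instance

-- ===== CLAIM (what is proved, stated in full; the proofs are below) =====
def Claim_equal_is_within_board : Prop := ∀ (move_from : String) (move_to : String), Dom_is_within_board move_from move_to → Spec_is_within_board move_from move_to (is_within_board move_from move_to)

-- ===== LEMMAS AND PROOFS =====

def pvRows : List String := (PySem.List.pyRange 1 11 1).map PySem.Int.toStr
def pvCols : List Char := ['a', 'b', 'c', 'd', 'e', 'f', 'g', 'h', 'i']

-- A's per-coordinate check, factored out of its two-coordinate condition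
def pvCondA (s : String) : Bool :=
  decide (1 < PySem.Str.len s ∧ PySem.Str.len s < 4) &&
  (match PySem.Str.pyGet? s 0 with
   | some c => decide (c ∈ pvCols)
   | none => false) &&
  decide (PySem.Str.slice s (some 1) none ∈ pvRows)

lemma pv_digit_iff (d : Char) : ('1' ≤ d ∧ d ≤ '9') ↔ (d = '1' ∨ d = '2' ∨ d = '3' ∨ d = '4' ∨ d = '5' ∨ d = '6' ∨ d = '7' ∨ d = '8' ∨ d = '9') := by
  have e1 : '1'.val.toNat = 49 := by decide
  have e2 : '2'.val.toNat = 50 := by decide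
  have e3 : '3'.val.toNat = 51 := by decide
  have e4 : '4'.val.toNat = 52 := by decide
  have e5 : '5'.val.toNat = 53 := by decide
  have e6 : '6'.val.toNat = 54 := by decide
  have e7 : '7'.val.toNat = 55 := by decide
  have e8 : '8'.val.toNat = 56 := by decide
  have e9 : '9'.val.toNat = 57 := by decide
  simp only [Char.le_def, UInt32.le_iff_toNat_le, Char.ext_iff, UInt32.ext_iff,
    e1, e2, e3, e4, e5, e6, e7, e8, e9]
  omega
lemma pv_col_iff (c : Char) :
    (c ∈ pvCols) ↔ ('a' ≤ c ∧ c ≤ 'i') := by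
  have e1 : 'a'.val.toNat = 97 := by decide
  have e2 : 'b'.val.toNat = 98 := by decide
  have e3 : 'c'.val.toNat = 99 := by decide
  have e4 : 'd'.val.toNat = 100 := by decide
  have e5 : 'e'.val.toNat = 101 := by decide
  have e6 : 'f'.val.toNat = 102 := by decide
  have e7 : 'g'.val.toNat = 103 := by decide
  have e8 : 'h'.val.toNat = 104 := by decide
  have e9 : 'i'.val.toNat = 105 := by decide
  simp only [pvCols, List.mem_cons, List.not_mem_nil, or_false, Char.le_def,
    UInt32.le_iff_toNat_le, Char.ext_iff, UInt32.ext_iff,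
    e1, e2, e3, e4, e5, e6, e7, e8, e9]
  omega
lemma pv_rows_eval : pvRows = ["1","2","3","4","5","6","7","8","9","10"] := by decide
lemma pv_row_two (s : String) (d : Char) (h : (PySem.Str.slice s (some 1) none).toList = [d]) :
    (PySem.Str.slice s (some 1) none ∈ pvRows) ↔ ('1' ≤ d ∧ d ≤ '9') := by
  have t1 : "1".toList = ['1'] := by decide
  have t2 : "2".toList = ['2'] := by decide
  have t3 : "3".toList = ['3'] := by decide
  have t4 : "4".toList = ['4'] := by decide
  have t5 : "5".toList = ['5'] := by decide
  have t6 : "6".toList = ['6'] := by decide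
  have t7 : "7".toList = ['7'] := by decide
  have t8 : "8".toList = ['8'] := by decide
  have t9 : "9".toList = ['9'] := by decide
  have t10 : "10".toList = ['1', '0'] := by decide
  rw [pv_rows_eval, pv_digit_iff]
  simp only [List.mem_cons, List.not_mem_nil, or_false, ← String.toList_inj, h,
    t1, t2, t3, t4, t5, t6, t7, t8, t9, t10, List.cons.injEq, and_true]
  simp
lemma pv_row_three (s : String) (d e : Char) (h : (PySem.Str.slice s (some 1) none).toList = [d, e]) :
    (PySem.Str.slice s (some 1) none ∈ pvRows) ↔ (d = '1' ∧ e = '0') := by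
  have t1 : "1".toList = ['1'] := by decide
  have t2 : "2".toList = ['2'] := by decide
  have t3 : "3".toList = ['3'] := by decide
  have t4 : "4".toList = ['4'] := by decide
  have t5 : "5".toList = ['5'] := by decide
  have t6 : "6".toList = ['6'] := by decide
  have t7 : "7".toList = ['7'] := by decide
  have t8 : "8".toList = ['8'] := by decide
  have t9 : "9".toList = ['9'] := by decide
  have t10 : "10".toList = ['1', '0'] := by decide
  rw [pv_rows_eval]
  simp only [List.mem_cons, List.not_mem_nil, or_false, ← String.toList_inj, h,
    t1, t2, t3, t4, t5, t6, t7, t8, t9, t10, List.cons.injEq, and_true]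
  simp

lemma pv_slice_two (s : String) (c d : Char) (h : s.toList = [c, d]) :
    (PySem.Str.slice s (some 1) none).toList = [d] := by
  simp [PySem.Str.slice, h, PySem.Chars.slice, PySem.List.slice]

lemma pv_slice_three (s : String) (c d e : Char) (h : s.toList = [c, d, e]) :
    (PySem.Str.slice s (some 1) none).toList = [d, e] := by
  simp [PySem.Str.slice, h, PySem.Chars.slice, PySem.List.slice]

lemma pv_get0 (s : String) (c : Char) (t : List Char) (h : s.toList = c :: t) :
    PySem.Str.pyGet? s 0 = some c := by
  simp [PySem.Str.pyGet?, PySem.Chars.pyGet?, h, PySem.List.pyGet?, PySem.List.pyIdx?]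

lemma pv_condA_eq (s : String) : pvCondA s = pvCoordRe s := by
  rcases hl : s.toList with _ | ⟨c, _ | ⟨d, _ | ⟨e, _ | ⟨f, t⟩⟩⟩⟩
  · have hg : PySem.Str.pyGet? s 0 = none := by
      simp [PySem.Str.pyGet?, PySem.Chars.pyGet?, hl, PySem.List.pyGet?, PySem.List.pyIdx?]
    simp [pvCondA, pvCoordRe, hl]
  · simp [pvCondA, pvCoordRe, hl]
  · have hg := pv_get0 s c [d] hl
    have hlen : PySem.Str.len s = 2 := by simp [hl]
    have hrow := pv_row_two s d (pv_slice_two s c d hl)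
    rw [Bool.eq_iff_iff]
    simp only [pvCondA, pvCoordRe, hl, hg, hlen, Bool.and_eq_true, decide_eq_true_eq,
      pv_col_iff, hrow]
    norm_num
  · have hg := pv_get0 s c [d, e] hl
    have hlen : PySem.Str.len s = 3 := by simp [hl]
    have hrow := pv_row_three s d e (pv_slice_three s c d e hl)
    rw [Bool.eq_iff_iff]
    simp only [pvCondA, pvCoordRe, hl, hg, hlen, Bool.and_eq_true, decide_eq_true_eq,
      beq_iff_eq, pv_col_iff, hrow]
    norm_num
  · simp [pvCondA, pvCoordRe, hl]
    omega

lemma pv_factor (move_from move_to : String) :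
    is_within_board move_from move_to = (pvCondA move_from && pvCondA move_to) := by
  unfold is_within_board pvCondA
  simp only [pvCols, pvRows]
  cases hf : PySem.Str.pyGet? move_from 0 <;> cases ht : PySem.Str.pyGet? move_to 0
  · simp
  · simp
  · simp
  · rw [Bool.eq_iff_iff]
    simp only [Bool.and_eq_true, decide_eq_true_eq]
    split_ifs with h1 h2
    · exact iff_of_true rfl
        ⟨⟨⟨⟨h1.1, h1.2.1⟩, h2.1⟩, h2.2.2.1⟩, ⟨⟨h1.2.2.1, h1.2.2.2⟩, h2.2.1⟩, h2.2.2.2⟩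
    · refine iff_of_false (by simp) ?_
      rintro ⟨⟨⟨-, mf⟩, rf⟩, ⟨-, mt⟩, rt⟩
      exact h2 ⟨mf, mt, rf, rt⟩
    · refine iff_of_false (by simp) ?_
      rintro ⟨⟨⟨lf, -⟩, -⟩, ⟨lt, -⟩, -⟩
      exact h1 ⟨lf.1, lf.2, lt.1, lt.2⟩

-- ===== VERDICT (by name: the statement is the Claim_ definition above) =====
theorem is_within_board_spec : Claim_equal_is_within_board := by
  intro move_from move_to _
  unfold Spec_is_within_board is_within_board_alt
  rw [pv_factor, pv_condA_eq, pv_condA_eq]
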